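-- pv_equiv track=rewrite | github.com/zachweisman0105/OpenDentalQueryTool | src/opendental_query/utils/sql_parser.py | _find_top_level_token_index
-- ===== SOURCE A (Python) =====
-- def _find_top_level_token_index(query: str, token: str) -> int:
--     """Find index of a top-level token (e.g., 'limit' or 'offset') in the original query.
--
--     Scans the original query text while tracking parentheses depth to avoid
--     matches inside subqueries. Returns the index of the first occurrence or -1.
--     """
--     lower = query.lower()
--     token = token.lower()
--     depth = 0
--     i = 0
--     while i < len(lower):
--         c = lower[i]
--         if c == "(":
--             depth += 1
--         elif c == ")":
--             depth = max(0, depth - 1)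
--         elif depth == 0 and lower.startswith(token, i):
--             # ensure token boundary (avoid matching identifiers)
--             before_ok = (i == 0) or not lower[i - 1].isalnum()
--             after_ok = (i + len(token) == len(lower)) or not lower[i + len(token)].isalnum()
--             if before_ok and after_ok:
--                 return i
--         i += 1
--     return -1
-- ===== SOURCE B (Python) =====
-- def _find_top_level_token_index(query: str, token: str) -> int:
--     """Two-phase: first build a clamped parenthesis-depth prefix table over the
--     lowercased query, then scan candidate positions against that table."""
--     lower = query.lower()
--     t = token.lower()
--     n = len(lower)
--     # depth[i] = clamped paren depth just before position i
--     depth = [0]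
--     d = 0
--     for c in lower:
--         if c == "(":
--             d += 1
--         elif c == ")":
--             d = max(0, d - 1)
--         depth.append(d)
--     for i in range(n):
--         if (depth[i] == 0 and lower[i] not in "()" and lower.startswith(t, i)
--                 and (i == 0 or not lower[i - 1].isalnum())
--                 and (i + len(t) == n or not lower[i + len(t)].isalnum())):
--             return i
--     return -1
-- ===== Notes on version B (the rewrite author's own statement) =====
-- stated objective: alternative
-- what changed: Replaces A's single fused scan (which threads the parenthesis depth through the same loop that tests matches) by a two-phase decomposition: one pass builds a clamped depth-prefix table, then a separate candidate scan checks depth-0, non-paren position, literal match and isalnum boundaries per index.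
import Mathlib
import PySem

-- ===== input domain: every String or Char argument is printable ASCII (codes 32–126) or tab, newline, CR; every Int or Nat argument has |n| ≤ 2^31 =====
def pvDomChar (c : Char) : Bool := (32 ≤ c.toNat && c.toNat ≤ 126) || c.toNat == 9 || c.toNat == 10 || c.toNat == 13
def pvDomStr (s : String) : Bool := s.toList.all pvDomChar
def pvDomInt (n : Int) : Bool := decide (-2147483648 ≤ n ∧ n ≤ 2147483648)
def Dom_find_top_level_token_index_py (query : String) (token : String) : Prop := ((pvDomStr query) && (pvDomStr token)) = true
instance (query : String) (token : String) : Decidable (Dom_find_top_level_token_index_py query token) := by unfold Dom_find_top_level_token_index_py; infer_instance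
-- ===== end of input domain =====

-- B replaces A's fused scan by a depth-prefix table built in one pass plus a separate candidate scan (alternative decomposition, same cost).

-- ===== PORT A =====
-- A's while-loop: index i and running clamped depth threaded through one fused scan.
def pvGoA (lw t : List Char) (i : Nat) (depth : Int) : Int :=
  if _h : i < lw.length then
    let c := lw[i]
    if c == '(' then pvGoA lw t (i+1) (depth+1)
    else if c == ')' then pvGoA lw t (i+1) (max 0 (depth-1))
    else if depth == 0 && PySem.Chars.startswith (lw.drop i) t then
      if (i == 0 || !(PySem.Chars.isalnum (lw.getD (i-1) ' '))) &&
         (i + t.length == lw.length || !(PySem.Chars.isalnum (lw.getD (i + t.length) ' '))) then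
        (i : Int)
      else pvGoA lw t (i+1) depth
    else pvGoA lw t (i+1) depth
  else -1
termination_by lw.length - i

def find_top_level_token_index_py (query : String) (token : String) : Int :=
  pvGoA (PySem.Chars.lower query.toList) (PySem.Chars.lower token.toList) 0 0

-- ===== PORT B =====
-- B phase 1: the clamped-depth step and the prefix table depth[0..n] (a scanl).
def pvStepB (d : Int) (c : Char) : Int :=
  if c == '(' then d + 1 else if c == ')' then max 0 (d - 1) else d

-- B phase 2: the per-candidate condition checked against the table.
def pvCondB (lw t : List Char) (depths : List Int) (i : Nat) : Bool :=
  depths.getD i 0 == 0 &&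
  !(lw.getD i ' ' == '(' || lw.getD i ' ' == ')') &&
  PySem.Chars.startswith (lw.drop i) t &&
  (i == 0 || !(PySem.Chars.isalnum (lw.getD (i-1) ' '))) &&
  (i + t.length == lw.length || !(PySem.Chars.isalnum (lw.getD (i + t.length) ' ')))

def find_top_level_token_index_py_alt (query : String) (token : String) : Int :=
  let lw := PySem.Chars.lower query.toList
  let t := PySem.Chars.lower token.toList
  let depths := List.scanl pvStepB 0 lw
  match (List.range lw.length).find? (pvCondB lw t depths) with
  | some i => (i : Int)
  | none => -1

-- ===== PRECONDITION & SPEC =====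
def Spec_find_top_level_token_index_py (query : String) (token : String) (out : Int) : Prop := out = find_top_level_token_index_py_alt query token
instance (query : String) (token : String) (out : Int) : Decidable (Spec_find_top_level_token_index_py query token out) := by unfold Spec_find_top_level_token_index_py; infer_instance

-- ===== CLAIM (what is proved, stated in full; the proofs are below) =====
def Claim_equal_find_top_level_token_index_py : Prop := ∀ (query : String) (token : String), Dom_find_top_level_token_index_py query token → Spec_find_top_level_token_index_py query token (find_top_level_token_index_py query token)

-- ===== LEMMAS AND PROOFS =====

theorem pvScanl_getD_zero (f : Int → Char → Int) (b : Int) (l : List Char) :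
    (List.scanl f b l).getD 0 0 = b := by
  cases l <;> simp [List.scanl_nil, List.scanl_cons]

theorem pvScanl_getD_succ (f : Int → Char → Int) (b : Int) (l : List Char) (i : Nat)
    (h : i < l.length) :
    (List.scanl f b l).getD (i+1) 0 = f ((List.scanl f b l).getD i 0) l[i] := by
  induction l generalizing b i with
  | nil => simp at h
  | cons a l ih =>
    cases i with
    | zero => simp [List.scanl_cons]
    | succ j =>
      simp only [List.scanl_cons, List.getD_cons_succ]
      exact ih (f b a) j (by simpa using h)

theorem pvMain (lw t : List Char) (k i : Nat) (hk : i + k = lw.length) :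
    pvGoA lw t i ((List.scanl pvStepB 0 lw).getD i 0) =
      (match (List.range' i k).find? (pvCondB lw t (List.scanl pvStepB 0 lw)) with
       | some j => (j : Int)
       | none => -1) := by
  induction k generalizing i with
  | zero =>
    rw [pvGoA]
    simp [List.range', hk ▸ (by omega : ¬ i < i + 0)]
  | succ k ih =>
    have hi : i < lw.length := by omega
    have hstep : (List.scanl pvStepB 0 lw).getD (i+1) 0
        = pvStepB ((List.scanl pvStepB 0 lw).getD i 0) lw[i] :=
      pvScanl_getD_succ _ _ _ _ hi
    have hrng : List.range' i (k+1) = i :: List.range' (i+1) k := by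
      simp [List.range']
    rw [pvGoA, hrng]
    simp only [hi, dif_pos]
    by_cases hlp : lw[i] == '('
    · have hcond : pvCondB lw t (List.scanl pvStepB 0 lw) i = false := by
        simp [pvCondB, List.getD_eq_getElem?_getD, hi]
        intro _; simp_all
      simp only [hlp, if_true, List.find?_cons, hcond]
      rw [show ((List.scanl pvStepB 0 lw).getD i 0) + 1
            = (List.scanl pvStepB 0 lw).getD (i+1) 0 by
            rw [hstep]; simp [pvStepB, hlp]]
      exact ih (i+1) (by omega)
    · by_cases hrp : lw[i] == ')'
      · have hcond : pvCondB lw t (List.scanl pvStepB 0 lw) i = false := by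
          simp [pvCondB, List.getD_eq_getElem?_getD, hi]
          intro _; simp_all
        simp only [hlp, hrp, if_true, List.find?_cons, hcond]
        rw [show max 0 (((List.scanl pvStepB 0 lw).getD i 0) - 1)
              = (List.scanl pvStepB 0 lw).getD (i+1) 0 by
              rw [hstep]; simp [pvStepB, hlp, hrp]]
        exact ih (i+1) (by omega)
      · have hsame : (List.scanl pvStepB 0 lw).getD (i+1) 0
            = (List.scanl pvStepB 0 lw).getD i 0 := by
          rw [hstep]; simp [pvStepB, hlp, hrp]
        have hget : lw.getD i ' ' = lw[i] := by
          simp [List.getD_eq_getElem?_getD, hi]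
        have hcond : pvCondB lw t (List.scanl pvStepB 0 lw) i
            = (((List.scanl pvStepB 0 lw).getD i 0 == 0
                && PySem.Chars.startswith (lw.drop i) t)
               && ((i == 0 || !(PySem.Chars.isalnum (lw.getD (i-1) ' ')))
                && (i + t.length == lw.length
                    || !(PySem.Chars.isalnum (lw.getD (i + t.length) ' '))))) := by
          simp only [pvCondB, hget, hlp, hrp]
          cases h1 : ((List.scanl pvStepB 0 lw).getD i 0 == 0) <;>
            cases h2 : PySem.Chars.startswith (lw.drop i) t <;> simp
        simp only [hlp, hrp, List.find?_cons, hcond]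
        by_cases hd : ((List.scanl pvStepB 0 lw).getD i 0 == 0
            && PySem.Chars.startswith (lw.drop i) t)
        · simp only [hd, if_true, Bool.true_and]
          by_cases hb : ((i == 0 || !(PySem.Chars.isalnum (lw.getD (i-1) ' ')))
              && (i + t.length == lw.length
                  || !(PySem.Chars.isalnum (lw.getD (i + t.length) ' '))))
          · have hb' := hb
            simp only [List.getD_eq_getElem?_getD] at hb'
            simp [hb']
          · simp only [hb, if_false, Bool.false_eq_true]
            rw [← hsame] at *
            simpa using ih (i+1) (by omega)
        · simp only [hd, if_false, Bool.false_and, Bool.false_eq_true]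
          rw [← hsame] at *
          simpa using ih (i+1) (by omega)

-- ===== VERDICT (by name: the statement is the Claim_ definition above) =====
theorem find_top_level_token_index_py_spec : Claim_equal_find_top_level_token_index_py := by
  intro query token _
  unfold Spec_find_top_level_token_index_py find_top_level_token_index_py find_top_level_token_index_py_alt
  simp only [List.range_eq_range']
  rw [← pvMain (PySem.Chars.lower query.toList) (PySem.Chars.lower token.toList)
        (PySem.Chars.lower query.toList).length 0 (by omega),
      pvScanl_getD_zero]
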